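-- pv_equiv track=rewrite | github.com/depromeet/algoStudy | medium/190116/gyukebox.py | steadyGene
-- ===== SOURCE A (Python) =====
-- from collections import Counter
--
-- def steadyGene(gene):
--     length = len(gene)
--     ideal = length // 4
--     counter = dict(Counter(gene))
--     to_replace = {}
--     for letter, appearance in counter.items():
--         if appearance > ideal:
--             to_replace[letter] = appearance - ideal
--
--     if not to_replace:
--         return 0
--
--     # find initial left and right bound
--     left_bound = 0
--     covered = {}
--     for i in range(length):
--         if gene[i] in to_replace:
--             if gene[i] in covered:
--                 covered[gene[i]] += 1
--             else:
--                 covered[gene[i]] = 1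
--         if covered.keys() == to_replace.keys():
--             if any(covered[key] < to_replace[key] for key in to_replace):
--                 continue
--             else:
--                 right_bound = i
--                 break
--
--     # search through rest
--     ans = right_bound - left_bound + 1
--     while right_bound < length:
--         left_bound_ptr = gene[left_bound]
--         if left_bound_ptr in to_replace:
--             covered[left_bound_ptr] -= 1
--             if covered[left_bound_ptr] < to_replace[left_bound_ptr]:
--                 right_bound += 1
--                 while right_bound < length and gene[right_bound] != left_bound_ptr:
--                     if gene[right_bound] in to_replace:
--                         covered[gene[right_bound]] += 1
--                     right_bound += 1
--                 covered[left_bound_ptr] += 1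
--
--         left_bound += 1
--         substr_len = right_bound - left_bound + 1
--         if substr_len < ans:
--             ans = substr_len
--
--     return ans
-- ===== SOURCE B (Python) =====
-- from collections import Counter
--
-- def steadyGene(gene):
--     n = len(gene)
--     ideal = n // 4
--     total = Counter(gene)
--     if all(v <= ideal for v in total.values()):
--         return 0
--     best = n
--     for left in range(n):
--         inside = Counter()
--         for right in range(left, n):
--             inside[gene[right]] += 1
--             if all(v - inside[c] <= ideal for c, v in total.items()):
--                 best = min(best, right - left + 1)
--                 break
--     return best
-- ===== Notes on version B (the rewrite author's own statement) =====
-- stated objective: simpler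
-- what changed: Replaces A's amortized two-pointer sliding window (with its to_replace deficit dict, keys()-equality bookkeeping and pointer-expansion inner loop) by a plain brute-force scan: for each left index, grow a fresh Counter window to the right and record the first length whose outside counts are all <= ideal.
import Mathlib
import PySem

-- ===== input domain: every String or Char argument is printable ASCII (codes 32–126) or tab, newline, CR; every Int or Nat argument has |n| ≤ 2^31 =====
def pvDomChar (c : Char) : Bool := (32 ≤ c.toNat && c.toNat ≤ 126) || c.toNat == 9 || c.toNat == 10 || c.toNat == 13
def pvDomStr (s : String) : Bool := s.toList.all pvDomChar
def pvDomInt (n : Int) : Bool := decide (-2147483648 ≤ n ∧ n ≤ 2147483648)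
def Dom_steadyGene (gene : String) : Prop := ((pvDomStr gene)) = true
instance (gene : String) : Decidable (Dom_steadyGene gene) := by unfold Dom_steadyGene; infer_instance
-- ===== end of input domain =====

-- B replaces A's two-pointer sliding window by a plain per-left brute-force scan (simpler, not faster);
-- proved to return the same minimum-window length on every string.

-- ===== PORT A =====
-- A-side helper: the 'for i in range(length)' loop searching the initial right bound; walks the
-- characters in order carrying the index i and the 'covered' dict.  'none' is the fall-through
-- case (Python would later raise NameError on the unbound 'right_bound'; unreachable when
-- to_replace is nonempty, which is the only case in which A calls this loop).
def pvFindRight (toReplace : PySem.Dict Char Int) :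
    List Char → Nat → PySem.Dict Char Int → Option (PySem.Dict Char Int × Nat)
  | [], _, _ => none
  | c :: rest, i, covered =>
    let covered :=
      if toReplace.contains c then
        if covered.contains c then covered.modify c 0 (· + 1) else covered.insert c 1
      else covered
    -- Python's covered.keys() == to_replace.keys() compares the key views as SETS
    if PySem.Set.equal covered.keys toReplace.keys then
      if toReplace.keys.any (fun k => covered.getD k 0 < toReplace.getD k 0) then
        pvFindRight toReplace rest (i + 1) covered
      else some (covered, i)
    else pvFindRight toReplace rest (i + 1) covered

-- A-side helper: the inner 'while right_bound < length and gene[right_bound] != left_bound_ptr' loop.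
def pvScan (cs : List Char) (toReplace : PySem.Dict Char Int) (x : Char)
    (covered : PySem.Dict Char Int) (right : Nat) : PySem.Dict Char Int × Nat :=
  if h : right < cs.length then
    if cs[right] ≠ x then
      let covered :=
        if toReplace.contains cs[right] then covered.modify cs[right] 0 (· + 1) else covered
      pvScan cs toReplace x covered (right + 1)
    else (covered, right)
  else (covered, right)
  termination_by cs.length - right
  decreasing_by omega

-- A-side helper: the body of the main loop's 'if left_bound_ptr in to_replace: ...' block,
-- computing the updated (covered, right_bound) pair.
def pvStepA (cs : List Char) (toReplace : PySem.Dict Char Int)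
    (covered : PySem.Dict Char Int) (x : Char) (right : Nat) : PySem.Dict Char Int × Nat :=
  if toReplace.contains x then
    let covered := covered.modify x 0 (· - 1)
    if covered.getD x 0 < toReplace.getD x 0 then
      let s := pvScan cs toReplace x covered (right + 1)
      (s.1.modify x 0 (· + 1), s.2)
    else (covered, right)
  else (covered, right)

-- A-side helper: the main 'while right_bound < length' loop.  gene[left_bound] is read with the
-- bounds check as guard: for left ≥ length Python would raise IndexError; that state is
-- unreachable from A's entry (the loop always holds a window left ≤ right).
def pvLoop2 (cs : List Char) (toReplace : PySem.Dict Char Int)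
    (covered : PySem.Dict Char Int) (left right : Nat) (ans : Int) : Int :=
  if right < cs.length then
    if hl : left < cs.length then
      let cr := pvStepA cs toReplace covered cs[left] right
      let left' := left + 1
      let substr : Int := (cr.2 : Int) - (left' : Int) + 1
      let ans' := if substr < ans then substr else ans
      pvLoop2 cs toReplace cr.1 left' cr.2 ans'
    else ans
  else ans
  termination_by cs.length - left
  decreasing_by omega

def steadyGene (gene : String) : Int :=
  let cs := gene.toList
  let length : Int := PySem.Str.len gene
  let ideal : Int := PySem.Int.floordiv length 4
  let counter : PySem.Dict Char Int := PySem.Dict.counter cs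
  let toReplace : PySem.Dict Char Int :=
    counter.items.foldl
      (fun d p => if p.2 > ideal then d.insert p.1 (p.2 - ideal) else d) PySem.Dict.empty
  if toReplace.items.isEmpty then 0
  else
    match pvFindRight toReplace cs 0 PySem.Dict.empty with
    | none => 0   -- Python: NameError (unreachable: to_replace is nonempty here)
    | some (covered, rightBound) =>
      let leftBound : Nat := 0
      let ans : Int := (rightBound : Int) - (leftBound : Int) + 1
      pvLoop2 cs toReplace covered leftBound rightBound ans

-- ===== PORT B =====
-- B-side helper: the inner 'for right in range(left, n)' loop; returns the window length
-- recorded at the break, none if the loop runs out.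
def pvAltScan (total : PySem.Dict Char Int) (ideal : Int) :
    List Char → PySem.Dict Char Int → Nat → Option Nat
  | [], _, _ => none
  | c :: rest, inside, len =>
    let inside := inside.modify c 0 (· + 1)
    if total.items.all (fun p => p.2 - inside.getD p.1 0 ≤ ideal) then some (len + 1)
    else pvAltScan total ideal rest inside (len + 1)

-- B-side helper: the outer 'for left in range(n)' loop over the suffixes of the string.
def pvAltOuter (total : PySem.Dict Char Int) (ideal : Int) : List Char → Int → Int
  | [], best => best
  | c :: rest, best =>
    let best :=
      match pvAltScan total ideal (c :: rest) PySem.Dict.empty 0 with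
      | some L => min best (L : Int)
      | none => best
    pvAltOuter total ideal rest best

def steadyGene_alt (gene : String) : Int :=
  let cs := gene.toList
  let n := cs.length
  let ideal : Int := PySem.Int.floordiv (n : Int) 4
  let total : PySem.Dict Char Int := PySem.Dict.counter cs
  if total.values.all (fun v => v ≤ ideal) then 0
  else pvAltOuter total ideal cs (n : Int)

-- ===== PRECONDITION & SPEC =====
def Spec_steadyGene (gene : String) (out : Int) : Prop := out = steadyGene_alt gene
instance (gene : String) (out : Int) : Decidable (Spec_steadyGene gene out) := by unfold Spec_steadyGene; infer_instance

-- ===== CLAIM (what is proved, stated in full; the proofs are below) =====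
def Claim_equal_steadyGene : Prop := ∀ (gene : String), Dom_steadyGene gene → Spec_steadyGene gene (steadyGene gene)

-- ===== LEMMAS AND PROOFS =====

-- ---------- spec-side helpers (proof-only) ----------
def pvCnt (cs : List Char) (c : Char) : Nat := cs.count c
def pvIdeal (cs : List Char) : Nat := cs.length / 4
-- the window of length L starting at index l
def pvWin (cs : List Char) (l L : Nat) : List Char := (cs.drop l).take L
-- 'the window (l, L) leaves every letter's outside count ≤ ideal'
def pvOkb (cs : List Char) (l L : Nat) : Bool :=
  cs.all fun c => decide (pvCnt cs c ≤ pvIdeal cs + (pvWin cs l L).count c)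
-- least good window length at left index l (none if no window starting at l is good)
def pvFirst (cs : List Char) (l : Nat) : Option Nat :=
  (List.range' 1 (cs.length - l)).find? (pvOkb cs l)
def pvStep (cs : List Char) (best : Int) (l : Nat) : Int :=
  match pvFirst cs l with
  | some L => min best (L : Int)
  | none => best
-- a letter that appears more than ideal times
def pvHot (cs : List Char) (c : Char) : Prop := c ∈ cs ∧ pvIdeal cs < pvCnt cs c
-- the common value both programs compute in the unbalanced case
def pvSpecVal (cs : List Char) : Int := (List.range cs.length).foldl (pvStep cs) (cs.length : Int)
-- 'tR is A's to_replace dict'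
def pvRep (cs : List Char) (tR : PySem.Dict Char Int) : Prop :=
  (∀ c, tR.contains c = true ↔ pvHot cs c) ∧
  (∀ c, pvHot cs c → tR.getD c 0 = (pvCnt cs c : Int) - (pvIdeal cs : Int))

-- ---------- window lemmas ----------
lemma pvOkb_iff {cs : List Char} {l L : Nat} :
    pvOkb cs l L = true ↔ ∀ c ∈ cs, pvCnt cs c ≤ pvIdeal cs + (pvWin cs l L).count c := by
  simp [pvOkb, List.all_eq_true]

lemma pvOkb_iff_hot {cs : List Char} {l L : Nat} :
    pvOkb cs l L = true ↔ ∀ c, pvHot cs c → pvCnt cs c - pvIdeal cs ≤ (pvWin cs l L).count c := by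
  rw [pvOkb_iff]; constructor
  · rintro h c ⟨hc, hlt⟩; have := h c hc; omega
  · intro h c hc
    by_cases hlt : pvIdeal cs < pvCnt cs c
    · have := h c ⟨hc, hlt⟩; omega
    · omega

lemma pvWin_sublist {cs : List Char} {l L l' L' : Nat} (h1 : l' ≤ l) (h2 : l + L ≤ l' + L') :
    (pvWin cs l L).Sublist (pvWin cs l' L') := by
  have e1 : pvWin cs l L = ((cs.drop l').take ((l - l') + L)).drop (l - l') := by
    rw [← List.take_drop, List.drop_drop, pvWin]
    congr 2; omega
  rw [e1, pvWin]
  exact (List.drop_sublist _ _).trans (List.take_sublist_take_left (by omega))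

lemma pvWin_count_mono {cs : List Char} {l L l' L' : Nat} (c : Char)
    (h1 : l' ≤ l) (h2 : l + L ≤ l' + L') :
    (pvWin cs l L).count c ≤ (pvWin cs l' L').count c :=
  (pvWin_sublist h1 h2).count_le c

lemma pvOkb_mono {cs : List Char} {l L l' L' : Nat} (h : pvOkb cs l L = true)
    (h1 : l' ≤ l) (h2 : l + L ≤ l' + L') : pvOkb cs l' L' = true := by
  rw [pvOkb_iff] at h ⊢
  intro c hc
  have := h c hc
  have := pvWin_count_mono (cs := cs) c h1 h2
  omega

lemma pvWin_zero_left (cs : List Char) (L : Nat) : pvWin cs 0 L = cs.take L := by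
  simp [pvWin]

lemma pvOkb_full (cs : List Char) : pvOkb cs 0 cs.length = true := by
  rw [pvOkb_iff]
  intro c _
  have e : pvWin cs 0 cs.length = cs := by simp [pvWin_zero_left]
  rw [e]
  unfold pvCnt
  omega

lemma pvWin_cons {cs : List Char} {l K : Nat} (h : l < cs.length) :
    pvWin cs l (K + 1) = cs[l] :: pvWin cs (l + 1) K := by
  unfold pvWin
  rw [List.drop_eq_getElem_cons h, List.take_succ_cons]

lemma pvWin_split (cs : List Char) (l a b : Nat) :
    pvWin cs l (a + b) = pvWin cs l a ++ pvWin cs (l + a) b := by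
  simp [pvWin, List.take_add, List.drop_drop]

lemma pvWin_zero (cs : List Char) (l : Nat) : pvWin cs l 0 = [] := rfl

lemma pvWin_pos {cs : List Char} {l L : Nat} {c : Char} (h : 0 < (pvWin cs l L).count c) :
    l < cs.length ∧ 1 ≤ L := by
  have hm : c ∈ pvWin cs l L := List.count_pos_iff.mp h
  constructor
  · by_contra hl
    have : cs.drop l = [] := List.drop_eq_nil_of_le (by omega)
    simp [pvWin, this] at hm
  · by_contra hL
    have : L = 0 := by omega
    simp [this, pvWin_zero] at hm

lemma pvHot_win_pos {cs : List Char} {l L : Nat} {c : Char} (hc : pvHot cs c)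
    (h : pvOkb cs l L = true) : 0 < (pvWin cs l L).count c := by
  rw [pvOkb_iff_hot] at h
  have h1 := h c hc
  have h2 := hc.2
  omega

lemma pvWin_one {cs : List Char} {j : Nat} (h : j < cs.length) : pvWin cs j 1 = [cs[j]] := by
  unfold pvWin
  rw [List.drop_eq_getElem_cons h]
  rfl

-- ---------- find? on range' ----------
lemma pvFind_range'_some {p : Nat → Bool} :
    ∀ {m s L : Nat}, ((List.range' s m).find? p = some L ↔
      (s ≤ L ∧ L < s + m ∧ p L = true ∧ ∀ K, s ≤ K → K < L → p K = false)) := by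
  intro m
  induction m with
  | zero =>
    intro s L
    constructor
    · intro h; simp [List.range'] at h
    · rintro ⟨h1, h2, _⟩; omega
  | succ m ih =>
    intro s L
    rw [List.range'_succ]
    by_cases hp : p s = true
    · rw [List.find?_cons_of_pos hp]
      constructor
      · intro h
        have : s = L := by injection h
        subst this
        exact ⟨le_refl _, by omega, hp, fun K h1 h2 => by omega⟩
      · rintro ⟨h1, h2, h3, h4⟩
        have : L = s := by
          by_contra hne
          have hps := h4 s (le_refl _) (by omega)
          rw [hps] at hp
          exact absurd hp (by simp)
        rw [this]
    · rw [List.find?_cons_of_neg hp, ih]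
      constructor
      · rintro ⟨h1, h2, h3, h4⟩
        refine ⟨by omega, by omega, h3, fun K hK1 hK2 => ?_⟩
        by_cases hKs : K = s
        · subst hKs; exact eq_false_of_ne_true hp
        · exact h4 K (by omega) hK2
      · rintro ⟨h1, h2, h3, h4⟩
        have hsL : s ≠ L := fun e => hp (e ▸ h3)
        exact ⟨by omega, by omega, h3, fun K a b => h4 K (by omega) b⟩

lemma pvFind_range'_none {p : Nat → Bool} {s m : Nat} :
    (List.range' s m).find? p = none ↔ ∀ K, s ≤ K → K < s + m → p K = false := by
  rw [List.find?_eq_none]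
  constructor
  · intro h K h1 h2
    have := h K (List.mem_range'_1.mpr ⟨h1, h2⟩)
    exact eq_false_of_ne_true this
  · intro h x hx
    have := List.mem_range'_1.mp hx
    rw [h x this.1 this.2]; simp

lemma pvFirst_none_mono {cs : List Char} {l l' : Nat}
    (h : pvFirst cs l = none) (hll : l ≤ l') : pvFirst cs l' = none := by
  unfold pvFirst at h ⊢
  rw [pvFind_range'_none] at h ⊢
  intro K h1 h2
  by_contra hK
  have hK' : pvOkb cs l' K = true := by
    cases hb : pvOkb cs l' K
    · exact absurd hb hK
    · rfl
  have hok : pvOkb cs l ((l' + K) - l) = true :=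
    pvOkb_mono hK' hll (by omega)
  have := h ((l' + K) - l) (by omega) (by omega)
  rw [this] at hok; exact absurd hok (by simp)

lemma pvFirst_zero_some (cs : List Char) (hne : ∃ c, pvHot cs c) :
    ∃ L, pvFirst cs 0 = some L := by
  cases h : pvFirst cs 0 with
  | some L => exact ⟨L, rfl⟩
  | none =>
    obtain ⟨c, hc⟩ := hne
    have hn : 1 ≤ cs.length := by
      have := hc.1
      cases cs with
      | nil => simp at this
      | cons a t => simp
    unfold pvFirst at h
    rw [pvFind_range'_none] at h
    have := h cs.length (by omega) (by omega)
    have hfull := pvOkb_full cs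
    rw [this] at hfull; exact absurd hfull (by simp)

lemma pvFirst_shift {cs : List Char} {l r : Nat} (hfirst : pvFirst cs l = some (r + 1 - l))
    (hlr : l ≤ r) (hok : pvOkb cs (l + 1) (r - l) = true) (hpos : 1 ≤ r - l) :
    pvFirst cs (l + 1) = some (r - l) := by
  obtain ⟨h1, h2, h3, hmin⟩ := pvFind_range'_some.mp hfirst
  apply pvFind_range'_some.mpr
  refine ⟨hpos, by omega, hok, fun K hK1 hK2 => ?_⟩
  cases hb : pvOkb cs (l + 1) K with
  | false => rfl
  | true =>
    have hmono := pvOkb_mono hb (show l ≤ l + 1 by omega) (show (l + 1) + K ≤ l + (K + 1) by omega)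
    have hf := hmin (K + 1) (by omega) (by omega)
    rw [hf] at hmono
    exact absurd hmono (by simp)

-- ---------- the to_replace dict ----------
lemma pvIdealInt (cs : List Char) :
    PySem.Int.floordiv (cs.length : Int) 4 = (pvIdeal cs : Int) := by
  rw [PySem.Int.floordiv_eq_ediv_of_pos (by norm_num)]
  unfold pvIdeal
  omega

-- A's to_replace dict as built by the port (with ideal already written as a Nat cast)
def pvTRof (cs : List Char) : PySem.Dict Char Int :=
  (PySem.Dict.counter cs).items.foldl
    (fun d p => if p.2 > ((pvIdeal cs : Nat) : Int) then d.insert p.1 (p.2 - ((pvIdeal cs : Nat) : Int)) else d)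
    PySem.Dict.empty

def pvLst (cs : List Char) : List Char :=
  (PySem.Set.ofList cs).filter (fun c => decide (((cs.count c : Nat) : Int) > ((pvIdeal cs : Nat) : Int)))

lemma pvLst_nodup (cs : List Char) : (pvLst cs).Nodup :=
  (PySem.Set.nodup_ofList cs).filter _

lemma pvLst_mem {cs : List Char} {c : Char} : c ∈ pvLst cs ↔ pvHot cs c := by
  unfold pvLst pvHot pvCnt
  rw [List.mem_filter, PySem.Set.mem_ofList]
  simp only [decide_eq_true_eq, gt_iff_lt, Nat.cast_lt]

lemma pvTRof_items (cs : List Char) :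
    (pvTRof cs).items = (pvLst cs).map (fun c => (c, ((cs.count c : Nat) : Int) - ((pvIdeal cs : Nat) : Int))) := by
  unfold pvTRof
  have e1 : (PySem.Dict.counter cs).items.foldl
      (fun d p => if p.2 > ((pvIdeal cs : Nat) : Int) then d.insert p.1 (p.2 - ((pvIdeal cs : Nat) : Int)) else d)
      PySem.Dict.empty
      = ((PySem.Dict.counter cs).items.filter
          (fun p => decide (p.2 > ((pvIdeal cs : Nat) : Int)))).foldl
          (fun d p => d.insert p.1 (p.2 - ((pvIdeal cs : Nat) : Int))) PySem.Dict.empty :=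
    PySem.List.foldl_ite_eq_foldl_filter _ _ _ _
  rw [e1, PySem.Dict.items_counter, List.filter_map]
  have hpred : ((fun p : Char × Int => decide (p.2 > ((pvIdeal cs : Nat) : Int))) ∘
      (fun k => (k, ((List.count k cs : Nat) : Int)))) =
      (fun c => decide (((cs.count c : Nat) : Int) > ((pvIdeal cs : Nat) : Int))) := by
    funext c; rfl
  rw [hpred]
  have hnodup : ((((PySem.Set.ofList cs).filter
      (fun c => decide (((cs.count c : Nat) : Int) > ((pvIdeal cs : Nat) : Int)))).map
        (fun k => (k, ((List.count k cs : Nat) : Int)))).map Prod.fst).Nodup := by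
    rw [List.map_map]
    have : (Prod.fst ∘ fun c : Char => (c, ((List.count c cs : Nat) : Int))) = id := by
      funext c; rfl
    rw [this, List.map_id]
    exact pvLst_nodup cs
  have e2 := PySem.Dict.items_foldl_insert_fresh
    (((PySem.Set.ofList cs).filter
      (fun c => decide (((cs.count c : Nat) : Int) > ((pvIdeal cs : Nat) : Int)))).map
        (fun k => (k, ((List.count k cs : Nat) : Int))))
    Prod.fst (fun p => p.2 - ((pvIdeal cs : Nat) : Int)) PySem.Dict.empty
    (fun a _ => PySem.Dict.contains_empty a.1) hnodup
  rw [e2]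
  simp only [List.map_map, pvLst]
  rfl

lemma pvTRof_keys (cs : List Char) : (pvTRof cs).keys = pvLst cs := by
  simp only [PySem.Dict.keys, pvTRof_items, List.map_map]
  have : ((fun p : Char × Int => p.1) ∘
      (fun c : Char => (c, ((cs.count c : Nat) : Int) - ((pvIdeal cs : Nat) : Int)))) = id := by
    funext c; rfl
  rw [this, List.map_id]

lemma pvTRof_contains {cs : List Char} {c : Char} :
    (pvTRof cs).contains c = true ↔ pvHot cs c := by
  rw [PySem.Dict.contains_iff_mem_keys, pvTRof_keys, pvLst_mem]

lemma pvTRof_getD {cs : List Char} {c : Char} (h : pvHot cs c) :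
    (pvTRof cs).getD c 0 = (pvCnt cs c : Int) - (pvIdeal cs : Int) := by
  have hm : (c, ((cs.count c : Nat) : Int) - ((pvIdeal cs : Nat) : Int)) ∈ (pvTRof cs).items := by
    rw [pvTRof_items]
    exact List.mem_map_of_mem (pvLst_mem.mpr h)
  have hnd : (pvTRof cs).keys.Nodup := by rw [pvTRof_keys]; exact pvLst_nodup cs
  exact PySem.Dict.getD_of_mem_items _ hm hnd 0

lemma pvTRof_rep (cs : List Char) : pvRep cs (pvTRof cs) :=
  ⟨fun _ => pvTRof_contains, fun _ h => pvTRof_getD h⟩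

lemma pvTRof_empty_iff (cs : List Char) :
    (pvTRof cs).items = [] ↔ ∀ c ∈ cs, pvCnt cs c ≤ pvIdeal cs := by
  rw [pvTRof_items, List.map_eq_nil_iff]
  unfold pvLst
  rw [List.filter_eq_nil_iff]
  constructor
  · intro h c hc
    have := h c ((PySem.Set.mem_ofList cs c).mpr hc)
    simp only [decide_eq_true_eq, gt_iff_lt, Nat.cast_lt] at this
    unfold pvCnt
    omega
  · intro h c hc
    have := h c ((PySem.Set.mem_ofList cs c).mp hc)
    simp only [decide_eq_true_eq, gt_iff_lt, Nat.cast_lt]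
    unfold pvCnt at this
    omega

-- ---------- A-side loop lemmas ----------
lemma pvFoldl_none {cs : List Char} {s m : Nat} (h : ∀ l ∈ List.range' s m, pvFirst cs l = none) :
    ∀ ans, (List.range' s m).foldl (pvStep cs) ans = ans := by
  intro ans
  have e : List.foldl (pvStep cs) ans (List.range' s m)
      = List.foldl (fun acc _ => acc) ans (List.range' s m) :=
    PySem.List.foldl_congr_mem _ _ _ _ (fun acc x hx => by simp [pvStep, h x hx])
  rw [e]
  exact PySem.List.foldl_ignore _ _


lemma pvScan_spec (cs : List Char) (tR : PySem.Dict Char Int) (x : Char) :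
    ∀ k r d, cs.length - r ≤ k → r ≤ cs.length →
    ∃ j d', pvScan cs tR x d r = (d', j) ∧ r ≤ j ∧ j ≤ cs.length ∧
      (∀ hj : j < cs.length, cs[j] = x) ∧
      (pvWin cs r (j - r)).count x = 0 ∧
      (∀ c, tR.contains c = true → d'.getD c 0 = d.getD c 0 + ((pvWin cs r (j - r)).count c : Int)) := by
  intro k
  induction k with
  | zero =>
    intro r d hk hr
    have hnr : ¬ r < cs.length := by omega
    refine ⟨r, d, ?_, le_refl _, hr, fun hj => absurd hj hnr, ?_, ?_⟩
    · rw [pvScan, dif_neg hnr]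
    · simp [pvWin_zero]
    · intro c _
      simp [pvWin_zero]
  | succ k ih =>
    intro r d hk hr
    by_cases hlt : r < cs.length
    · by_cases hx : cs[r] ≠ x
      · obtain ⟨j, d', heq, h1, h2, h3, h4, h5⟩ :=
          ih (r + 1) (if tR.contains cs[r] then d.modify cs[r] 0 (· + 1) else d) (by omega) (by omega)
        have hjr : j - r = (j - (r + 1)) + 1 := by omega
        have hsplit : pvWin cs r (j - r) = cs[r] :: pvWin cs (r + 1) (j - (r + 1)) := by
          rw [hjr, pvWin_cons hlt]
        refine ⟨j, d', ?_, by omega, h2, h3, ?_, ?_⟩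
        · rw [pvScan, dif_pos hlt, if_pos hx]
          exact heq
        · rw [hsplit, List.count_cons_of_ne hx, h4]
        · intro c hc
          have h5' := h5 c hc
          rw [hsplit]
          by_cases hceq : c = cs[r]
          · subst hceq
            rw [List.count_cons_self]
            rw [if_pos hc, PySem.Dict.getD_modify, if_pos rfl] at h5'
            rw [h5']
            push_cast
            ring
          · rw [List.count_cons_of_ne (show cs[r] ≠ c from fun e => hceq e.symm)]
            have hgd : (if tR.contains cs[r] then d.modify cs[r] 0 (· + 1) else d).getD c 0
                = d.getD c 0 := by
              by_cases ht : tR.contains cs[r] = true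
              · rw [if_pos ht, PySem.Dict.getD_modify, if_neg hceq]
              · rw [if_neg ht]
            rw [hgd] at h5'
            exact h5'
      · rw [not_not] at hx
        refine ⟨r, d, ?_, le_refl _, by omega, fun _ => hx, ?_, ?_⟩
        · rw [pvScan, dif_pos hlt, if_neg (fun h => h hx)]
        · simp [pvWin_zero]
        · intro c _
          simp [pvWin_zero]
    · refine ⟨r, d, ?_, le_refl _, hr, fun hj => absurd hj hlt, ?_, ?_⟩
      · rw [pvScan, dif_neg hlt]
      · simp [pvWin_zero]
      · intro c _
        simp [pvWin_zero]

lemma pvFindRight_spec (cs : List Char) (tR : PySem.Dict Char Int) (hrep : pvRep cs tR)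
    {L : Nat} (hL : pvFirst cs 0 = some L) :
    ∀ k i cov, L - i ≤ k → i ≤ L - 1 →
      (∀ K, 1 ≤ K → K ≤ i → pvOkb cs 0 K = false) →
      (∀ c, tR.contains c = true → cov.getD c 0 = ((cs.take i).count c : Int)) →
      (∀ c, cov.contains c = true ↔ (tR.contains c = true ∧ c ∈ cs.take i)) →
      ∃ d, pvFindRight tR (cs.drop i) i cov = some (d, L - 1) ∧
        ∀ c, tR.contains c = true → d.getD c 0 = ((cs.take L).count c : Int) := by
  obtain ⟨hrc, hrv⟩ := hrep
  obtain ⟨hL1, hL2, hLok, hLmin⟩ := pvFind_range'_some.mp hL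
  intro k
  induction k with
  | zero =>
    intro i cov hk hi _ _ _
    exact absurd hi (by omega)
  | succ k ih =>
    intro i cov hk hi hpre hcov hkeys
    have hin : i < cs.length := by omega
    rw [List.drop_eq_getElem_cons hin]
    simp only [pvFindRight]
    have htake : cs.take (i + 1) = cs.take i ++ [cs[i]] := by
      rw [← List.take_concat_get hin, List.concat_eq_append]
    have hcov' : ∀ c, tR.contains c = true →
        (if tR.contains cs[i] then
          (if cov.contains cs[i] then cov.modify cs[i] 0 (· + 1) else cov.insert cs[i] 1)
         else cov).getD c 0
        = ((cs.take (i + 1)).count c : Int) := by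
      intro c hc
      rw [htake, List.count_append]
      by_cases hceq : c = cs[i]
      · subst hceq
        rw [if_pos hc]
        have h1 : List.count cs[i] [cs[i]] = 1 := by simp
        rw [h1]
        by_cases hm : cov.contains cs[i] = true
        · rw [if_pos hm, PySem.Dict.getD_modify, if_pos rfl, hcov _ hc]
          push_cast
          ring
        · rw [if_neg hm, PySem.Dict.getD_insert, if_pos rfl]
          have h0 : (cs.take i).count cs[i] = 0 :=
            List.count_eq_zero.mpr (fun hmem => hm ((hkeys _).mpr ⟨hc, hmem⟩))
          rw [h0]
          simp
      · have h0 : List.count c [cs[i]] = 0 := List.count_eq_zero.mpr (by simpa using hceq)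
        rw [h0, Nat.add_zero]
        have hgd : (if tR.contains cs[i] then
            (if cov.contains cs[i] then cov.modify cs[i] 0 (· + 1) else cov.insert cs[i] 1)
           else cov).getD c 0 = cov.getD c 0 := by
          by_cases ht : tR.contains cs[i] = true
          · rw [if_pos ht]
            by_cases hm : cov.contains cs[i] = true
            · rw [if_pos hm, PySem.Dict.getD_modify, if_neg hceq]
            · rw [if_neg hm, PySem.Dict.getD_insert, if_neg hceq]
          · rw [if_neg ht]
        rw [hgd]
        exact hcov c hc
    have hkeys' : ∀ c, (if tR.contains cs[i] then
          (if cov.contains cs[i] then cov.modify cs[i] 0 (· + 1) else cov.insert cs[i] 1)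
         else cov).contains c = true
        ↔ (tR.contains c = true ∧ c ∈ cs.take (i + 1)) := by
      intro c
      have hmem : c ∈ cs.take (i + 1) ↔ (c ∈ cs.take i ∨ c = cs[i]) := by
        rw [htake, List.mem_append, List.mem_singleton]
      by_cases ht : tR.contains cs[i] = true
      · have hcontains : (if tR.contains cs[i] then
            (if cov.contains cs[i] then cov.modify cs[i] 0 (· + 1) else cov.insert cs[i] 1)
           else cov).contains c = (c == cs[i] || cov.contains c) := by
          rw [if_pos ht]
          by_cases hm : cov.contains cs[i] = true
          · rw [if_pos hm, PySem.Dict.contains_modify]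
          · rw [if_neg hm, PySem.Dict.contains_insert]
        rw [hcontains, hmem]
        constructor
        · intro h
          have h' : c = cs[i] ∨ cov.contains c = true := by simpa using h
          rcases h' with hb | hb
          · exact ⟨by rw [hb]; exact ht, Or.inr hb⟩
          · have h2 := (hkeys c).mp hb
            exact ⟨h2.1, Or.inl h2.2⟩
        · rintro ⟨htc, hmc⟩
          have h' : c = cs[i] ∨ cov.contains c = true := by
            rcases hmc with hmc | hmc
            · exact Or.inr ((hkeys c).mpr ⟨htc, hmc⟩)
            · exact Or.inl hmc
          simpa using h' 
      · rw [if_neg ht, hkeys c]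
        constructor
        · rintro ⟨a, b⟩
          exact ⟨a, by rw [htake]; exact List.mem_append_left _ b⟩
        · rintro ⟨a, hb⟩
          rcases hmem.mp hb with h | h
          · exact ⟨a, h⟩
          · exfalso
            apply ht
            rw [← h]
            exact a
    set cov2 := (if tR.contains cs[i] then
        (if cov.contains cs[i] then cov.modify cs[i] 0 (· + 1) else cov.insert cs[i] 1)
       else cov) with hcov2
    have hwin : pvWin cs 0 (i + 1) = cs.take (i + 1) := pvWin_zero_left cs (i + 1)
    have hkeq_iff : (PySem.Set.equal cov2.keys tR.keys = true) ↔
        (∀ c, tR.contains c = true → c ∈ cs.take (i + 1)) := by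
      rw [PySem.Set.equal_iff]
      constructor
      · intro h c hc
        have hmemk : c ∈ cov2.keys := (h c).mpr ((PySem.Dict.contains_iff_mem_keys tR c).mp hc)
        exact ((hkeys' c).mp ((PySem.Dict.contains_iff_mem_keys cov2 c).mpr hmemk)).2
      · intro hP c
        rw [← PySem.Dict.contains_iff_mem_keys, ← PySem.Dict.contains_iff_mem_keys, hkeys' c]
        constructor
        · exact fun h => h.1
        · exact fun h => ⟨h, hP c h⟩
    have hany_iff : (∀ c, tR.contains c = true → c ∈ cs.take (i + 1)) →
        ((tR.keys.any (fun k0 => decide (cov2.getD k0 0 < tR.getD k0 0)) = false)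
          ↔ pvOkb cs 0 (i + 1) = true) := by
      intro hP
      constructor
      · intro hb
        rw [pvOkb_iff_hot]
        intro c hhot
        have hcont : tR.contains c = true := (hrc c).mpr hhot
        have hmemk : c ∈ tR.keys := (PySem.Dict.contains_iff_mem_keys tR c).mp hcont
        have hnd : ¬ (decide (cov2.getD c 0 < tR.getD c 0) = true) := by
          intro hd
          have hany : tR.keys.any (fun k0 => decide (cov2.getD k0 0 < tR.getD k0 0)) = true :=
            List.any_eq_true.mpr ⟨c, hmemk, hd⟩
          rw [hb] at hany
          exact absurd hany (by simp)
        have hge : ¬ (cov2.getD c 0 < tR.getD c 0) := fun h => hnd (decide_eq_true h)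
        rw [hcov' c hcont, hrv c hhot] at hge
        rw [hwin]
        omega
      · intro hok
        cases hb : tR.keys.any (fun k0 => decide (cov2.getD k0 0 < tR.getD k0 0)) with
        | false => rfl
        | true =>
          exfalso
          obtain ⟨c, hcmem, hcdec⟩ := List.any_eq_true.mp hb
          have hcont : tR.contains c = true := (PySem.Dict.contains_iff_mem_keys tR c).mpr hcmem
          have hhot : pvHot cs c := (hrc c).mp hcont
          have hlt := of_decide_eq_true hcdec
          rw [hcov' c hcont, hrv c hhot] at hlt
          have hcnt := pvOkb_iff_hot.mp hok c hhot
          rw [hwin] at hcnt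
          omega
    by_cases hok : pvOkb cs 0 (i + 1) = true
    · have hP : ∀ c, tR.contains c = true → c ∈ cs.take (i + 1) := by
        intro c hc
        have hhot := (hrc c).mp hc
        have hposc := pvHot_win_pos hhot hok
        rw [hwin] at hposc
        exact List.count_pos_iff.mp hposc
      have hiL : i + 1 = L := by
        by_cases hlt2 : i + 1 < L
        · exfalso
          have hf := hLmin (i + 1) (by omega) hlt2
          rw [hf] at hok
          exact absurd hok (by simp)
        · omega
      rw [if_pos (hkeq_iff.mpr hP)]
      have hanyf : (tR.keys.any (fun k0 => decide (cov2.getD k0 0 < tR.getD k0 0))) = false :=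
        (hany_iff hP).mpr hok
      rw [if_neg (by rw [hanyf]; simp)]
      refine ⟨cov2, ?_, ?_⟩
      · have e : i = L - 1 := by omega
        rw [e]
      · intro c hc
        have hh := hcov' c hc
        rw [hiL] at hh
        exact hh
    · have hiL : i + 1 < L := by
        rcases Nat.lt_or_ge (i + 1) L with h | h
        · exact h
        · exfalso
          have e : i + 1 = L := by omega
          rw [e] at hok
          exact hok hLok
      have hpre' : ∀ K, 1 ≤ K → K ≤ i + 1 → pvOkb cs 0 K = false := by
        intro K h1 h2
        rcases Nat.lt_or_ge K (i + 1) with h | h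
        · exact hpre K h1 (by omega)
        · have e : K = i + 1 := by omega
          rw [e]
          cases hb : pvOkb cs 0 (i + 1) with
          | false => rfl
          | true => exact absurd hb hok
      obtain ⟨d, hd1, hd2⟩ := ih (i + 1) cov2 (by omega) (by omega) hpre' hcov' hkeys'
      refine ⟨d, ?_, hd2⟩
      by_cases hkeq : PySem.Set.equal cov2.keys tR.keys = true
      · rw [if_pos hkeq]
        have hany : tR.keys.any (fun k0 => decide (cov2.getD k0 0 < tR.getD k0 0)) = true := by
          cases hb : tR.keys.any (fun k0 => decide (cov2.getD k0 0 < tR.getD k0 0)) with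
          | true => rfl
          | false => exact absurd ((hany_iff (hkeq_iff.mp hkeq)).mp hb) hok
        rw [if_pos hany]
        exact hd1
      · rw [if_neg hkeq]
        exact hd1

lemma pvStepA_eq (cs : List Char) (tR d : PySem.Dict Char Int) (x : Char) (r : Nat) :
    pvStepA cs tR d x r =
      if tR.contains x then
        (if (d.modify x 0 (· - 1)).getD x 0 < tR.getD x 0 then
          ((pvScan cs tR x (d.modify x 0 (· - 1)) (r + 1)).1.modify x 0 (· + 1),
           (pvScan cs tR x (d.modify x 0 (· - 1)) (r + 1)).2)
        else (d.modify x 0 (· - 1), r))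
      else (d, r) := rfl

lemma pvLoop2_unfold (cs : List Char) (tR d : PySem.Dict Char Int) (l r : Nat) (ans : Int)
    (hrn : r < cs.length) (hln : l < cs.length) :
    pvLoop2 cs tR d l r ans =
      pvLoop2 cs tR (pvStepA cs tR d cs[l] r).1 (l + 1) (pvStepA cs tR d cs[l] r).2
        (if ((pvStepA cs tR d cs[l] r).2 : Int) - (((l + 1 : Nat)) : Int) + 1 < ans then
          ((pvStepA cs tR d cs[l] r).2 : Int) - (((l + 1 : Nat)) : Int) + 1
         else ans) := by
  rw [pvLoop2, if_pos hrn, dif_pos hln]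

lemma pvLoop2_spec (cs : List Char) (tR : PySem.Dict Char Int) (hrep : pvRep cs tR)
    (hne : ∃ c, pvHot cs c) :
    ∀ k l r d ans, cs.length - l ≤ k → l ≤ r → r < cs.length →
      pvFirst cs l = some (r + 1 - l) →
      (∀ c, tR.contains c = true → d.getD c 0 = ((pvWin cs l (r + 1 - l)).count c : Int)) →
      ans ≤ (r : Int) + 1 - (l : Int) →
      pvLoop2 cs tR d l r ans = (List.range' (l + 1) (cs.length - (l + 1))).foldl (pvStep cs) ans := by
  obtain ⟨hrc, hrv⟩ := hrep
  intro k
  induction k with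
  | zero =>
    intro l r d ans hk hlr hrn _ _ _
    exact absurd hrn (by omega)
  | succ k ih =>
    intro l r d ans hk hlr hrn hfirst hcov hans
    have hln : l < cs.length := by omega
    obtain ⟨hF1, hF2, hFok, hFmin⟩ := pvFind_range'_some.mp hfirst
    have hwsplit : pvWin cs l (r + 1 - l) = cs[l] :: pvWin cs (l + 1) (r - l) := by
      have e : r + 1 - l = (r - l) + 1 := by omega
      rw [e, pvWin_cons hln]
    have hcnt_tail : ∀ c, c ≠ cs[l] →
        (pvWin cs (l + 1) (r - l)).count c = (pvWin cs l (r + 1 - l)).count c := by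
      intro c hc
      rw [hwsplit, List.count_cons_of_ne (show cs[l] ≠ c from fun e => hc e.symm)]
    rw [pvLoop2_unfold cs tR d l r ans hrn hln, pvStepA_eq]
    by_cases hcx : tR.contains cs[l] = true
    · have hhotx : pvHot cs cs[l] := (hrc cs[l]).mp hcx
      rw [if_pos hcx]
      have hgdx : (d.modify cs[l] 0 (· - 1)).getD cs[l] 0
          = ((pvWin cs l (r + 1 - l)).count cs[l] : Int) - 1 := by
        rw [PySem.Dict.getD_modify, if_pos rfl, hcov cs[l] hcx]
      have hWx : (pvWin cs l (r + 1 - l)).count cs[l]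
          = (pvWin cs (l + 1) (r - l)).count cs[l] + 1 := by
        rw [hwsplit, List.count_cons_self]
      have hNx := pvOkb_iff_hot.mp hFok cs[l] hhotx
      by_cases hdef : (d.modify cs[l] 0 (· - 1)).getD cs[l] 0 < tR.getD cs[l] 0
      · rw [if_pos hdef]
        rw [hgdx, hrv cs[l] hhotx] at hdef
        have hWeq : (pvWin cs (l + 1) (r - l)).count cs[l] + 1 = pvCnt cs cs[l] - pvIdeal cs := by
          have h2 := hhotx.2
          omega
        obtain ⟨j, d2, heqscan, hj1, hj2, hj3, hj4, hj5⟩ :=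
          pvScan_spec cs tR cs[l] cs.length (r + 1) (d.modify cs[l] 0 (· - 1)) (by omega) (by omega)
        rw [heqscan]
        dsimp only
        by_cases hjn : j < cs.length
        · have hxj : cs[j] = cs[l] := hj3 hjn
          have hwj : pvWin cs (l + 1) (j - l) =
              pvWin cs (l + 1) (r - l) ++ pvWin cs (r + 1) (j - (r + 1)) ++ [cs[l]] := by
            have e1 : j - l = (r - l) + ((j - (r + 1)) + 1) := by omega
            rw [e1, pvWin_split]
            have e2 : l + 1 + (r - l) = r + 1 := by omega
            rw [e2]
            rw [pvWin_split cs (r + 1) (j - (r + 1)) 1]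
            have e3 : r + 1 + (j - (r + 1)) = j := by omega
            rw [e3, pvWin_one hjn, hxj, List.append_assoc]
          have hok' : pvOkb cs (l + 1) (j - l) = true := by
            rw [pvOkb_iff_hot]
            intro c hhot
            rw [hwj, List.count_append, List.count_append]
            by_cases hceq : c = cs[l]
            · subst hceq
              have hone : List.count cs[l] [cs[l]] = 1 := by simp
              rw [hone, hj4]
              omega
            · have h0 : List.count c [cs[l]] = 0 := List.count_eq_zero.mpr (by simpa using hceq)
              rw [h0]
              have hcw := pvOkb_iff_hot.mp hFok c hhot
              have htl := hcnt_tail c hceq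
              omega
          have hmin' : ∀ K, 1 ≤ K → K < j - l → pvOkb cs (l + 1) K = false := by
            intro K h1 h2
            cases hb : pvOkb cs (l + 1) K with
            | false => rfl
            | true =>
              exfalso
              have hxcount : (pvWin cs (l + 1) K).count cs[l] < pvCnt cs cs[l] - pvIdeal cs := by
                by_cases hK : K ≤ r - l
                · have hsub := pvWin_count_mono (cs := cs) cs[l] (le_refl (l + 1))
                    (show (l + 1) + K ≤ (l + 1) + (r - l) by omega)
                  omega
                · have e1 : K = (r - l) + (K - (r - l)) := by omega
                  rw [e1, pvWin_split]
                  have e2 : l + 1 + (r - l) = r + 1 := by omega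
                  rw [e2, List.count_append]
                  have hsfx : (pvWin cs (r + 1) (K - (r - l))).count cs[l]
                      ≤ (pvWin cs (r + 1) (j - (r + 1))).count cs[l] :=
                    pvWin_count_mono cs[l] (le_refl (r + 1)) (by omega)
                  omega
              have hcw := pvOkb_iff_hot.mp hb cs[l] hhotx
              omega
          have hfirst' : pvFirst cs (l + 1) = some (j - l) :=
            pvFind_range'_some.mpr ⟨by omega, by omega, hok', hmin'⟩
          have hcov' : ∀ c, tR.contains c = true →
              (d2.modify cs[l] 0 (· + 1)).getD c 0 = ((pvWin cs (l + 1) (j - l)).count c : Int) := by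
            intro c hc
            have h5 := hj5 c hc
            rw [PySem.Dict.getD_modify]
            by_cases hceq : c = cs[l]
            · subst hceq
              rw [if_pos rfl, h5, hgdx, hj4]
              rw [hwj, List.count_append, List.count_append]
              have hone : List.count cs[l] [cs[l]] = 1 := by simp
              rw [hone, hj4]
              push_cast
              omega
            · rw [if_neg hceq, h5]
              have hgd2 : (d.modify cs[l] 0 (· - 1)).getD c 0 = d.getD c 0 := by
                rw [PySem.Dict.getD_modify, if_neg hceq]
              rw [hgd2, hcov c hc]
              rw [hwj, List.count_append, List.count_append]
              have h0 : List.count c [cs[l]] = 0 := List.count_eq_zero.mpr (by simpa using hceq)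
              have htl := hcnt_tail c hceq
              rw [h0, htl]
              push_cast
              omega
          have hrange : cs.length - (l + 1) = (cs.length - (l + 2)) + 1 := by omega
          rw [hrange, List.range'_succ, List.foldl_cons]
          have hsubst : ((j : Nat) : Int) - (((l + 1 : Nat)) : Int) + 1 = ((j - l : Nat) : Int) := by
            push_cast
            omega
          have hans' : (if ((j : Nat) : Int) - (((l + 1 : Nat)) : Int) + 1 < ans then
              ((j : Nat) : Int) - (((l + 1 : Nat)) : Int) + 1 else ans) = pvStep cs ans (l + 1) := by
            simp only [pvStep, hfirst']
            rw [hsubst]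
            by_cases h : ans ≤ ((j - l : Nat) : Int)
            · rw [if_neg (by omega), min_eq_left h]
            · rw [if_pos (by omega), min_eq_right (by omega)]
          rw [hans']
          apply ih (l + 1) j (d2.modify cs[l] 0 (· + 1)) (pvStep cs ans (l + 1))
            (by omega) (by omega) hjn ?_ ?_ ?_
          · have e : j + 1 - (l + 1) = j - l := by omega
            rw [e]
            exact hfirst'
          · intro c hc
            have e : j + 1 - (l + 1) = j - l := by omega
            rw [e]
            exact hcov' c hc
          · simp only [pvStep, hfirst']
            have hmr := min_le_right ans ((j - l : Nat) : Int)
            omega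
        · have hjn' : j = cs.length := by omega
          subst hjn'
          have hnone : pvFirst cs (l + 1) = none := by
            unfold pvFirst
            rw [pvFind_range'_none]
            intro K h1 h2
            cases hb : pvOkb cs (l + 1) K with
            | false => rfl
            | true =>
              exfalso
              have hxcount : (pvWin cs (l + 1) K).count cs[l] < pvCnt cs cs[l] - pvIdeal cs := by
                by_cases hK : K ≤ r - l
                · have hsub := pvWin_count_mono (cs := cs) cs[l] (le_refl (l + 1))
                    (show (l + 1) + K ≤ (l + 1) + (r - l) by omega)
                  omega
                · have e1 : K = (r - l) + (K - (r - l)) := by omega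
                  rw [e1, pvWin_split]
                  have e2 : l + 1 + (r - l) = r + 1 := by omega
                  rw [e2, List.count_append]
                  have hsfx : (pvWin cs (r + 1) (K - (r - l))).count cs[l]
                      ≤ (pvWin cs (r + 1) (cs.length - (r + 1))).count cs[l] :=
                    pvWin_count_mono cs[l] (le_refl (r + 1)) (by omega)
                  omega
              have hcw := pvOkb_iff_hot.mp hb cs[l] hhotx
              omega
          have hcond : ¬ (((cs.length : Nat) : Int) - (((l + 1 : Nat)) : Int) + 1 < ans) := by
            omega
          rw [if_neg hcond]
          rw [pvLoop2, if_neg (lt_irrefl cs.length)]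
          exact (pvFoldl_none (fun l' hl' =>
            pvFirst_none_mono hnone (List.mem_range'_1.mp hl').1) ans).symm
      · rw [if_neg hdef]
        dsimp only
        rw [hgdx, hrv cs[l] hhotx] at hdef
        have hok' : pvOkb cs (l + 1) (r - l) = true := by
          rw [pvOkb_iff_hot]
          intro c hhot
          by_cases hceq : c = cs[l]
          · subst hceq
            omega
          · have htl := hcnt_tail c hceq
            have hcw := pvOkb_iff_hot.mp hFok c hhot
            omega
        have hpos : 1 ≤ r - l := by
          obtain ⟨cH, hcH⟩ := hne
          exact (pvWin_pos (pvHot_win_pos hcH hok')).2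
        have hfirst' := pvFirst_shift hfirst hlr hok' hpos
        have hcov' : ∀ c, tR.contains c = true →
            (d.modify cs[l] 0 (· - 1)).getD c 0 = ((pvWin cs (l + 1) (r - l)).count c : Int) := by
          intro c hc
          by_cases hceq : c = cs[l]
          · subst hceq
            rw [hgdx]
            omega
          · rw [PySem.Dict.getD_modify, if_neg hceq, hcov c hc]
            rw [hcnt_tail c hceq]
        have hrange : cs.length - (l + 1) = (cs.length - (l + 2)) + 1 := by omega
        rw [hrange, List.range'_succ, List.foldl_cons]
        have hsubst : ((r : Nat) : Int) - (((l + 1 : Nat)) : Int) + 1 = ((r - l : Nat) : Int) := by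
          push_cast
          omega
        have hans' : (if ((r : Nat) : Int) - (((l + 1 : Nat)) : Int) + 1 < ans then
            ((r : Nat) : Int) - (((l + 1 : Nat)) : Int) + 1 else ans) = pvStep cs ans (l + 1) := by
          simp only [pvStep, hfirst']
          rw [hsubst]
          by_cases h : ans ≤ ((r - l : Nat) : Int)
          · rw [if_neg (by omega), min_eq_left h]
          · rw [if_pos (by omega), min_eq_right (by omega)]
        rw [hans']
        apply ih (l + 1) r (d.modify cs[l] 0 (· - 1)) (pvStep cs ans (l + 1))
          (by omega) (by omega) hrn ?_ ?_ ?_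
        · have e : r + 1 - (l + 1) = r - l := by omega
          rw [e]
          exact hfirst'
        · intro c hc
          have e : r + 1 - (l + 1) = r - l := by omega
          rw [e]
          exact hcov' c hc
        · simp only [pvStep, hfirst']
          have hmr := min_le_right ans ((r - l : Nat) : Int)
          omega
    · rw [if_neg hcx]
      dsimp only
      obtain ⟨cH, hcH⟩ := hne
      have hok' : pvOkb cs (l + 1) (r - l) = true := by
        rw [pvOkb_iff_hot]
        intro c hhot
        have hcne : c ≠ cs[l] := fun e => hcx (by rw [← e]; exact (hrc c).mpr hhot)
        rw [hcnt_tail c hcne]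
        exact pvOkb_iff_hot.mp hFok c hhot
      have hpos : 1 ≤ r - l := (pvWin_pos (pvHot_win_pos hcH hok')).2
      have hfirst' := pvFirst_shift hfirst hlr hok' hpos
      have hrange : cs.length - (l + 1) = (cs.length - (l + 2)) + 1 := by omega
      rw [hrange, List.range'_succ, List.foldl_cons]
      have hsubst : ((r : Nat) : Int) - (((l + 1 : Nat)) : Int) + 1 = ((r - l : Nat) : Int) := by
        push_cast
        omega
      have hans' : (if ((r : Nat) : Int) - (((l + 1 : Nat)) : Int) + 1 < ans then
          ((r : Nat) : Int) - (((l + 1 : Nat)) : Int) + 1 else ans) = pvStep cs ans (l + 1) := by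
        simp only [pvStep, hfirst']
        rw [hsubst]
        by_cases h : ans ≤ ((r - l : Nat) : Int)
        · rw [if_neg (by omega), min_eq_left h]
        · rw [if_pos (by omega), min_eq_right (by omega)]
      rw [hans']
      apply ih (l + 1) r d (pvStep cs ans (l + 1)) (by omega) (by omega) hrn ?_ ?_ ?_
      · have e : r + 1 - (l + 1) = r - l := by omega
        rw [e]
        exact hfirst'
      · intro c hc
        have e : r + 1 - (l + 1) = r - l := by omega
        rw [e]
        have hcne : c ≠ cs[l] := fun e2 => hcx (by rw [← e2]; exact hc)
        rw [hcnt_tail c hcne]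
        exact hcov c hc
      · simp only [pvStep, hfirst']
        have hmr := min_le_right ans ((r - l : Nat) : Int)
        omega

-- ---------- B-side loop lemmas ----------
lemma pvAllItems_iff (cs : List Char) (inside : PySem.Dict Char Int) (l L : Nat)
    (hin : ∀ c, inside.getD c 0 = ((pvWin cs l L).count c : Int)) :
    ((PySem.Dict.counter cs).items.all
      (fun p => p.2 - inside.getD p.1 0 ≤ ((pvIdeal cs : Nat) : Int))) = pvOkb cs l L := by
  apply Bool.eq_iff_iff.mpr
  rw [PySem.Dict.items_counter, List.all_map, List.all_eq_true, pvOkb_iff]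
  constructor
  · intro h c hc
    have h2 := h c ((PySem.Set.mem_ofList cs c).mpr hc)
    simp only [Function.comp, decide_eq_true_eq] at h2
    rw [hin c] at h2
    unfold pvCnt
    omega
  · intro h c hc
    have hc' := (PySem.Set.mem_ofList cs c).mp hc
    have h2 := h c hc'
    simp only [Function.comp, decide_eq_true_eq]
    rw [hin c]
    unfold pvCnt at h2
    omega

lemma pvAltScan_spec (cs : List Char) :
    ∀ k l j inside, cs.length - (l + j) ≤ k →
      (∀ c, inside.getD c 0 = ((pvWin cs l j).count c : Int)) →
      pvAltScan (PySem.Dict.counter cs) ((pvIdeal cs : Nat) : Int) (cs.drop (l + j)) inside j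
        = (List.range' (j + 1) (cs.length - l - j)).find? (pvOkb cs l) := by
  intro k
  induction k with
  | zero =>
    intro l j inside hk _
    have hd : cs.drop (l + j) = [] := List.drop_eq_nil_of_le (by omega)
    have hm : cs.length - l - j = 0 := by omega
    rw [hd, hm]
    rfl
  | succ k ih =>
    intro l j inside hk hin
    by_cases hlt : l + j < cs.length
    · rw [List.drop_eq_getElem_cons hlt]
      simp only [pvAltScan]
      have hin' : ∀ c, (inside.modify cs[l + j] 0 (· + 1)).getD c 0
          = ((pvWin cs l (j + 1)).count c : Int) := by
        intro c
        have hw : pvWin cs l (j + 1) = pvWin cs l j ++ [cs[l + j]] := by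
          rw [pvWin_split cs l j 1]
          congr 1
          unfold pvWin
          rw [List.drop_eq_getElem_cons hlt]
          rfl
        rw [PySem.Dict.getD_modify, hw, List.count_append]
        by_cases hc : c = cs[l + j]
        · subst hc
          rw [if_pos rfl, hin]
          have h1 : List.count cs[l + j] [cs[l + j]] = 1 := by simp
          rw [h1]
          push_cast
          omega
        · rw [if_neg hc, hin c]
          have h0 : List.count c [cs[l + j]] = 0 :=
            List.count_eq_zero.mpr (by simpa using hc)
          rw [h0]
          simp
      rw [pvAllItems_iff cs _ l (j + 1) hin']
      have hm : cs.length - l - j = (cs.length - l - (j + 1)) + 1 := by omega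
      rw [hm, List.range'_succ]
      by_cases hok : pvOkb cs l (j + 1) = true
      · rw [if_pos hok, List.find?_cons_of_pos hok]
      · rw [if_neg hok, List.find?_cons_of_neg hok]
        have e : l + j + 1 = l + (j + 1) := by omega
        rw [e]
        exact ih l (j + 1) _ (by omega) hin'
    · have hd : cs.drop (l + j) = [] := List.drop_eq_nil_of_le (by omega)
      have hm : cs.length - l - j = 0 := by omega
      rw [hd, hm]
      rfl

lemma pvAltOuter_spec (cs : List Char) :
    ∀ k l best, cs.length - l ≤ k →
      pvAltOuter (PySem.Dict.counter cs) ((pvIdeal cs : Nat) : Int) (cs.drop l) best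
        = (List.range' l (cs.length - l)).foldl (pvStep cs) best := by
  intro k
  induction k with
  | zero =>
    intro l best hk
    have hd : cs.drop l = [] := List.drop_eq_nil_of_le (by omega)
    have hm : cs.length - l = 0 := by omega
    rw [hd, hm]
    rfl
  | succ k ih =>
    intro l best hk
    by_cases hlt : l < cs.length
    · have hscan := pvAltScan_spec cs (cs.length) l 0 PySem.Dict.empty (by omega)
        (fun c => by rw [PySem.Dict.getD_empty, pvWin_zero]; rfl)
      rw [Nat.add_zero] at hscan
      rw [List.drop_eq_getElem_cons hlt]
      simp only [pvAltOuter]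
      rw [← List.drop_eq_getElem_cons hlt, hscan]
      have hfirst : (List.range' (0 + 1) (cs.length - l - 0)).find? (pvOkb cs l) = pvFirst cs l := by
        unfold pvFirst
        norm_num
      rw [hfirst]
      have hm : cs.length - l = (cs.length - (l + 1)) + 1 := by omega
      rw [hm, List.range'_succ, List.foldl_cons]
      have hstep : (match pvFirst cs l with
          | some L => min best (L : Int)
          | none => best) = pvStep cs best l := by
        cases hf : pvFirst cs l <;> simp [pvStep, hf]
      rw [hstep]
      exact ih (l + 1) _ (by omega)
    · have hd : cs.drop l = [] := List.drop_eq_nil_of_le (by omega)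
      have hm : cs.length - l = 0 := by omega
      rw [hd, hm]
      rfl

lemma pvValuesAll_iff (cs : List Char) :
    ((PySem.Dict.counter cs).values.all (fun v => v ≤ ((pvIdeal cs : Nat) : Int)) = true) ↔
      ∀ c ∈ cs, pvCnt cs c ≤ pvIdeal cs := by
  rw [PySem.Dict.values_eq_map_keys _ (PySem.Dict.nodup_keys_counter cs) 0,
      PySem.Dict.keys_counter, List.all_map, List.all_eq_true]
  constructor
  · intro h c hc
    have h2 := h c ((PySem.Set.mem_ofList cs c).mpr hc)
    simp only [Function.comp, decide_eq_true_eq, PySem.Dict.getD_counter] at h2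
    unfold pvCnt
    omega
  · intro h c hc
    have h2 := h c ((PySem.Set.mem_ofList cs c).mp hc)
    simp only [Function.comp, decide_eq_true_eq, PySem.Dict.getD_counter]
    unfold pvCnt at h2
    omega

-- ---------- assemblies ----------
lemma steadyGene_eq_spec (gene : String) :
    steadyGene gene =
      (if ∀ c ∈ gene.toList, pvCnt gene.toList c ≤ pvIdeal gene.toList then 0
       else pvSpecVal gene.toList) := by
  simp only [steadyGene]
  rw [PySem.Str.len_eq, pvIdealInt]
  have htr : (PySem.Dict.counter gene.toList).items.foldl
      (fun d p => if p.2 > ((pvIdeal gene.toList : Nat) : Int) then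
        d.insert p.1 (p.2 - ((pvIdeal gene.toList : Nat) : Int)) else d)
      PySem.Dict.empty = pvTRof gene.toList := rfl
  rw [htr]
  set cs := gene.toList with hcs
  by_cases hbal : ∀ c ∈ cs, pvCnt cs c ≤ pvIdeal cs
  · rw [if_pos hbal]
    have hempty : (pvTRof cs).items = [] := (pvTRof_empty_iff cs).mpr hbal
    rw [hempty]
    simp
  · rw [if_neg hbal]
    have hne : ∃ c, pvHot cs c := by
      by_contra hno
      apply hbal
      intro c hc
      by_cases h : pvIdeal cs < pvCnt cs c
      · exact absurd ⟨c, hc, h⟩ hno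
      · omega
    have hnotempty : ¬ ((pvTRof cs).items.isEmpty = true) := by
      intro h
      exact hbal ((pvTRof_empty_iff cs).mp (List.isEmpty_iff.mp h))
    rw [if_neg hnotempty]
    obtain ⟨L0, hL0⟩ := pvFirst_zero_some cs hne
    obtain ⟨hL1, hL2, hLok, hLmin⟩ := pvFind_range'_some.mp hL0
    have hn1 : 1 ≤ cs.length := by
      obtain ⟨c, hc⟩ := hne
      exact List.length_pos_of_mem hc.1
    have hrep := pvTRof_rep cs
    obtain ⟨d, hfr, hdcov⟩ := pvFindRight_spec cs (pvTRof cs) hrep hL0 L0 0 PySem.Dict.empty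
      (by omega) (by omega) (fun K h1 h2 => by omega)
      (fun c _ => by rw [PySem.Dict.getD_empty]; simp)
      (fun c => by rw [PySem.Dict.contains_empty]; simp)
    rw [List.drop_zero] at hfr
    rw [hfr]
    have h1 : pvFirst cs 0 = some ((L0 - 1) + 1 - 0) := by
      have e : (L0 - 1) + 1 - 0 = L0 := by omega
      rw [e]
      exact hL0
    have h2 : ∀ c, (pvTRof cs).contains c = true →
        d.getD c 0 = ((pvWin cs 0 ((L0 - 1) + 1 - 0)).count c : Int) := by
      intro c hc
      have e : (L0 - 1) + 1 - 0 = L0 := by omega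
      rw [e, pvWin_zero_left]
      exact hdcov c hc
    have h3 : (((L0 - 1 : Nat)) : Int) - ((0 : Nat) : Int) + 1
        ≤ ((L0 - 1 : Nat) : Int) + 1 - ((0 : Nat) : Int) := by
      push_cast
      omega
    have hloop := pvLoop2_spec cs (pvTRof cs) hrep hne cs.length 0 (L0 - 1) d
      ((((L0 - 1 : Nat)) : Int) - ((0 : Nat) : Int) + 1)
      (by omega) (by omega) (by omega) h1 h2 h3
    show pvLoop2 cs (pvTRof cs) d 0 (L0 - 1)
        ((((L0 - 1 : Nat)) : Int) - ((0 : Nat) : Int) + 1) = pvSpecVal cs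
    rw [hloop]
    unfold pvSpecVal
    rw [List.range_eq_range']
    obtain ⟨m, hm⟩ : ∃ m, cs.length = m + 1 := ⟨cs.length - 1, by omega⟩
    rw [hm, List.range'_succ, List.foldl_cons]
    have hstep0 : pvStep cs (((m + 1 : Nat)) : Int) 0 = (L0 : Int) := by
      simp only [pvStep, hL0]
      exact min_eq_right (by exact_mod_cast (show L0 ≤ m + 1 by omega))
    rw [hstep0]
    have hans0 : (((L0 - 1 : Nat)) : Int) - ((0 : Nat) : Int) + 1 = (L0 : Int) := by
      push_cast
      omega
    rw [hans0]
    have he : (m + 1) - (0 + 1) = m := by omega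
    rw [he]

lemma steadyGene_alt_eq_spec (gene : String) :
    steadyGene_alt gene =
      (if ∀ c ∈ gene.toList, pvCnt gene.toList c ≤ pvIdeal gene.toList then 0
       else pvSpecVal gene.toList) := by
  simp only [steadyGene_alt]
  rw [pvIdealInt]
  by_cases hbal : ∀ c ∈ gene.toList, pvCnt gene.toList c ≤ pvIdeal gene.toList
  · rw [if_pos ((pvValuesAll_iff gene.toList).mpr hbal), if_pos hbal]
  · rw [if_neg (fun h => hbal ((pvValuesAll_iff gene.toList).mp h)), if_neg hbal]
    have houter := pvAltOuter_spec gene.toList gene.toList.length 0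
      ((gene.toList.length : Nat) : Int) (by omega)
    rw [List.drop_zero, Nat.sub_zero] at houter
    rw [houter]
    unfold pvSpecVal
    rw [List.range_eq_range']

-- ===== VERDICT (by name: the statement is the Claim_ definition above) =====
theorem steadyGene_spec : Claim_equal_steadyGene := by
  intro gene _
  unfold Spec_steadyGene
  rw [steadyGene_eq_spec, steadyGene_alt_eq_spec]
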